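-- pv_equiv track=rewrite | github.com/0x07CB/unitsN-python | Project/UnitsN/unitsN.py | whatIsTheUnitOfThisNumber
-- ===== SOURCE A (Python) =====
-- def whatIsTheUnitOfThisNumber(x):
--     d = str(x)
--     unitsMap = {
--         "": [1,2,3],
--         "K": [4,5,6],
--         "M": [7,8,9],
--         "G": [10,11,12],
--         "T": [13,14,15],
--         "P": [16,17,18]
--     }
--     #
--     for k,v in unitsMap.items():
--         if len(d) in v:
--             return k
--     return None
-- ===== SOURCE B (Python) =====
-- # B: closed-form arithmetic mapping from digit-count to prefix index (simpler; no dict scan).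
-- def whatIsTheUnitOfThisNumber(x):
--     idx = (len(str(x)) - 1) // 3
--     prefixes = ['', 'K', 'M', 'G', 'T', 'P']
--     return prefixes[idx] if 0 <= idx < 6 else None
-- ===== Notes on version B (the rewrite author's own statement) =====
-- stated objective: simpler
-- what changed: Replaces the loop over a dict of length-buckets with a closed-form index, floor-dividing the digit count minus one by three into a flat prefix list.
import Mathlib
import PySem

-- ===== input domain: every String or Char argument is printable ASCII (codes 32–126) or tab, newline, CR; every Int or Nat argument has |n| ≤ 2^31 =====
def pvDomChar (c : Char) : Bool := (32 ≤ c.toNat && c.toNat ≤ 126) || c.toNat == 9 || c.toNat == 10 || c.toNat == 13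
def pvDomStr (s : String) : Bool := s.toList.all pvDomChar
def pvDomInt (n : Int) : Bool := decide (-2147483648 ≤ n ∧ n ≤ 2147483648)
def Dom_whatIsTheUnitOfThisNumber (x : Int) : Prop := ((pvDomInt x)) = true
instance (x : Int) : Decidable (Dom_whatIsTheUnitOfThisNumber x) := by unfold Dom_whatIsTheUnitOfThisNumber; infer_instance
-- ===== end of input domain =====

-- ===== PORT A =====
-- B replaces A's scan over a dict of length-buckets by the closed-form index (len-1)//3 (objective: simpler).
def whatIsTheUnitOfThisNumber (x : Int) : Option String :=
  let d := PySem.Int.toStr x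
  let unitsMap : List (String × List Int) :=
    [("", [1,2,3]), ("K", [4,5,6]), ("M", [7,8,9]),
     ("G", [10,11,12]), ("T", [13,14,15]), ("P", [16,17,18])]
  (unitsMap.find? (fun kv => kv.2.contains (PySem.Str.len d))).map Prod.fst

-- ===== PORT B =====
def whatIsTheUnitOfThisNumber_alt (x : Int) : Option String :=
  let idx := PySem.Int.floordiv (PySem.Str.len (PySem.Int.toStr x) - 1) 3
  let prefixes : List String := ["", "K", "M", "G", "T", "P"]
  if 0 ≤ idx ∧ idx < 6 then PySem.List.pyGet? prefixes idx else none

-- ===== PRECONDITION & SPEC =====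
def Spec_whatIsTheUnitOfThisNumber (x : Int) (out : Option String) : Prop := out = whatIsTheUnitOfThisNumber_alt x
instance (x : Int) (out : Option String) : Decidable (Spec_whatIsTheUnitOfThisNumber x out) := by unfold Spec_whatIsTheUnitOfThisNumber; infer_instance

-- ===== CLAIM (what is proved, stated in full; the proofs are below) =====
def Claim_equal_whatIsTheUnitOfThisNumber : Prop := ∀ (x : Int), Dom_whatIsTheUnitOfThisNumber x → Spec_whatIsTheUnitOfThisNumber x (whatIsTheUnitOfThisNumber x)

-- ===== LEMMAS AND PROOFS =====

-- Both programs depend on the input only through the length of str(x); this lemma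
-- equates the two length → prefix computations for every length n.
theorem core_eq (n : Nat) :
    (([("", [1,2,3]), ("K", [4,5,6]), ("M", [7,8,9]),
       ("G", [10,11,12]), ("T", [13,14,15]), ("P", [16,17,18])] :
        List (String × List Int)).find?
        (fun kv => kv.2.contains (n : Int))).map Prod.fst
      =
    (if 0 ≤ PySem.Int.floordiv ((n : Int) - 1) 3 ∧ PySem.Int.floordiv ((n : Int) - 1) 3 < 6
      then PySem.List.pyGet? (["", "K", "M", "G", "T", "P"] : List String)
             (PySem.Int.floordiv ((n : Int) - 1) 3)
      else none) := by
  rcases Nat.lt_or_ge n 19 with h | h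
  · interval_cases n <;> decide
  · have h19 : (19 : Int) ≤ (n : Int) := by exact_mod_cast h
    have hfind : (([("", [1,2,3]), ("K", [4,5,6]), ("M", [7,8,9]),
       ("G", [10,11,12]), ("T", [13,14,15]), ("P", [16,17,18])] :
        List (String × List Int)).find?
        (fun kv => kv.2.contains (n : Int))) = none := by
      rw [List.find?_eq_none]
      intro kv hkv
      simp only [List.mem_cons, List.not_mem_nil, or_false] at hkv
      rcases hkv with h' | h' | h' | h' | h' | h' <;>
        subst h' <;> simp [List.contains_eq_mem, List.mem_cons] <;> omega
    have hq : (6 : Int) ≤ PySem.Int.floordiv ((n : Int) - 1) 3 := by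
      rw [PySem.Int.le_floordiv_iff_mul_le (by omega)]
      omega
    rw [hfind, if_neg (by omega)]
    rfl

theorem len_nat (x : Int) : PySem.Str.len (PySem.Int.toStr x) = ((PySem.Int.toStr x).toList.length : Int) := by
  simp [PySem.Str.len_eq]

-- ===== VERDICT (by name: the statement is the Claim_ definition above) =====
theorem whatIsTheUnitOfThisNumber_spec : Claim_equal_whatIsTheUnitOfThisNumber := by
  intro x _
  unfold Spec_whatIsTheUnitOfThisNumber whatIsTheUnitOfThisNumber whatIsTheUnitOfThisNumber_alt
  simp only [len_nat]
  exact core_eq ((PySem.Int.toStr x).toList.length)
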